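-- pv_equiv track=rewrite | github.com/sebcih/OptimumBid | odev.py | create_bid
-- ===== SOURCE A (Python) =====
-- def create_bid(working, bids):
--     answer = []
--     for index, bid in enumerate(bids):
--         if working and index < len(bids) - 1 and bids[index + 1][2] == True:
--             answer.append((bid[0], bid[1], -1))
--         elif bid[2] == True:
--             answer.append((bid[0], bid[1], 1))
--         else:
--             answer.append((bid[0], bid[1], 0))
--     return answer
-- ===== SOURCE B (Python) =====
-- def create_bid(working, bids):
--     # Reverse traversal: thread a carried "is the following bid accepted" flag,
--     # building the output back-to-front (no indexing, no lookahead), reverse once.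
--     out = []
--     next_accepted = False
--     for bid in reversed(bids):
--         if working and next_accepted:
--             out.append((bid[0], bid[1], -1))
--         elif bid[2] == True:
--             out.append((bid[0], bid[1], 1))
--         else:
--             out.append((bid[0], bid[1], 0))
--         next_accepted = bid[2] == True
--     out.reverse()
--     return out
-- ===== Notes on version B (the rewrite author's own statement) =====
-- stated objective: alternative
-- what changed: A scans forward by index with a bids[index+1] lookahead; B traverses the list in reverse threading a carried 'next bid accepted' boolean state, building the output back-to-front with no indexing, then reverses once.
import Mathlib
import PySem

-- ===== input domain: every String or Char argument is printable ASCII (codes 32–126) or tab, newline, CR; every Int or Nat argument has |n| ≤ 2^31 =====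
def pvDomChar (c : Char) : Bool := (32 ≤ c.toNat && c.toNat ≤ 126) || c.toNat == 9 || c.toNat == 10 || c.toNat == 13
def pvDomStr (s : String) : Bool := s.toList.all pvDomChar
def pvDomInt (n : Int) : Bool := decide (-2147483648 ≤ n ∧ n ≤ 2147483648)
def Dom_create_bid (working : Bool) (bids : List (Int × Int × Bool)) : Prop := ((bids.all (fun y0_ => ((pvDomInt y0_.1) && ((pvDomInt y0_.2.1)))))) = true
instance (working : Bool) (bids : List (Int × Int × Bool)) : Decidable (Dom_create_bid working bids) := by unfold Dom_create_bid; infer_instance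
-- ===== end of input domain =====

-- B replaces A's indexed forward scan with a bids[index+1] lookahead by a reverse
-- traversal threading a carried "next bid accepted" flag, built back-to-front.

-- ===== PORT A =====
-- literal transliteration: enumerate + append, lookahead bids[index+1][2] (guarded in range, so getD is exact)
def create_bid (working : Bool) (bids : List (Int × Int × Bool)) : List (Int × Int × Int) :=
  (PySem.List.enumerate bids).foldl
    (fun answer p =>
      let index := p.1
      let bid := p.2
      if working && decide (index < (bids.length : Int) - 1)
          && ((PySem.List.pyGetD bids (index + 1) (0, 0, false)).2.2 == true) then
        answer ++ [(bid.1, bid.2.1, (-1 : Int))]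
      else if bid.2.2 == true then
        answer ++ [(bid.1, bid.2.1, (1 : Int))]
      else
        answer ++ [(bid.1, bid.2.1, (0 : Int))])
    []

-- ===== PORT B =====
-- reverse loop threading (out, next_accepted); out is built back-to-front, reversed at the end
def create_bid_alt (working : Bool) (bids : List (Int × Int × Bool)) : List (Int × Int × Int) :=
  let st := bids.reverse.foldl
    (fun (st : List (Int × Int × Int) × Bool) bid =>
      let out := st.1
      let next_accepted := st.2
      let out' :=
        if working && next_accepted then out ++ [(bid.1, bid.2.1, (-1 : Int))]
        else if bid.2.2 == true then out ++ [(bid.1, bid.2.1, (1 : Int))]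
        else out ++ [(bid.1, bid.2.1, (0 : Int))]
      (out', bid.2.2 == true))
    ([], false)
  st.1.reverse

-- ===== PRECONDITION & SPEC =====
def Spec_create_bid (working : Bool) (bids : List (Int × Int × Bool)) (out : List (Int × Int × Int)) : Prop := out = create_bid_alt working bids
instance (working : Bool) (bids : List (Int × Int × Bool)) (out : List (Int × Int × Int)) : Decidable (Spec_create_bid working bids out) := by unfold Spec_create_bid; infer_instance

-- ===== CLAIM (what is proved, stated in full; the proofs are below) =====
def Claim_equal_create_bid : Prop := ∀ (working : Bool) (bids : List (Int × Int × Bool)), Dom_create_bid working bids → Spec_create_bid working bids (create_bid working bids)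

-- ===== LEMMAS AND PROOFS =====

-- A's per-element result as a function of the (index, bid) pair
def pvFlagA (working : Bool) (bids : List (Int × Int × Bool)) (p : Int × Int × Int × Bool) : Int × Int × Int :=
  if working && decide (p.1 < (bids.length : Int) - 1)
      && ((PySem.List.pyGetD bids (p.1 + 1) (0, 0, false)).2.2 == true) then
    (p.2.1, p.2.2.1, (-1 : Int))
  else if p.2.2.2 == true then
    (p.2.1, p.2.2.1, (1 : Int))
  else
    (p.2.1, p.2.2.1, (0 : Int))

theorem create_bid_eq_map (working : Bool) (bids : List (Int × Int × Bool)) :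
    create_bid working bids = (PySem.List.enumerate bids).map (pvFlagA working bids) := by
  unfold create_bid
  have h : (fun (answer : List (Int × Int × Int)) (p : Int × Int × Int × Bool) =>
      if working && decide (p.1 < (bids.length : Int) - 1)
          && ((PySem.List.pyGetD bids (p.1 + 1) (0, 0, false)).2.2 == true) then
        answer ++ [(p.2.1, p.2.2.1, (-1 : Int))]
      else if p.2.2.2 == true then
        answer ++ [(p.2.1, p.2.2.1, (1 : Int))]
      else
        answer ++ [(p.2.1, p.2.2.1, (0 : Int))])
      = (fun answer p => answer ++ [pvFlagA working bids p]) := by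
    funext answer p
    unfold pvFlagA
    split_ifs <;> rfl
  simp only []
  rw [h, PySem.List.foldl_append_singleton_eq_map]
  simp

-- structural-recursion characterisation of B's reverse loop:
-- pvBrec returns (result list for the suffix, "head of suffix is accepted")
def pvBrec (working : Bool) : List (Int × Int × Bool) → List (Int × Int × Int) × Bool
  | [] => ([], false)
  | b :: t =>
    let r := pvBrec working t
    let elem :=
      if working && r.2 then (b.1, b.2.1, (-1 : Int))
      else if b.2.2 == true then (b.1, b.2.1, (1 : Int))
      else (b.1, b.2.1, (0 : Int))
    (elem :: r.1, b.2.2 == true)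

theorem foldl_reverse_eq_brec (working : Bool) (bids : List (Int × Int × Bool)) :
    bids.reverse.foldl
      (fun (st : List (Int × Int × Int) × Bool) bid =>
        let out := st.1
        let next_accepted := st.2
        let out' :=
          if working && next_accepted then out ++ [(bid.1, bid.2.1, (-1 : Int))]
          else if bid.2.2 == true then out ++ [(bid.1, bid.2.1, (1 : Int))]
          else out ++ [(bid.1, bid.2.1, (0 : Int))]
        (out', bid.2.2 == true))
      ([], false)
    = ((pvBrec working bids).1.reverse, (pvBrec working bids).2) := by
  induction bids with
  | nil => simp [pvBrec]
  | cons b t ih =>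
    simp only [List.reverse_cons, List.foldl_append, List.foldl_cons, List.foldl_nil, ih]
    simp only [pvBrec]
    split_ifs <;> simp

theorem create_bid_alt_eq_brec (working : Bool) (bids : List (Int × Int × Bool)) :
    create_bid_alt working bids = (pvBrec working bids).1 := by
  unfold create_bid_alt
  simp only [foldl_reverse_eq_brec, List.reverse_reverse]

-- common pointwise spec: element j with its lookahead read through getElem?
def pvSpec (working : Bool) (bids : List (Int × Int × Bool)) (j : Nat) : Option (Int × Int × Int) :=
  bids[j]?.map (fun b =>
    (b.1, b.2.1,
      if working && ((bids[j+1]?.map (fun c => c.2.2 == true)).getD false) then (-1 : Int)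
      else if b.2.2 == true then (1 : Int) else (0 : Int)))

theorem brec_snd (working : Bool) (bids : List (Int × Int × Bool)) :
    (pvBrec working bids).2 = ((bids[0]?.map (fun c => c.2.2 == true)).getD false) := by
  cases bids <;> simp [pvBrec]

theorem brec_getElem? (working : Bool) (bids : List (Int × Int × Bool)) (j : Nat) :
    (pvBrec working bids).1[j]? = pvSpec working bids j := by
  induction bids generalizing j with
  | nil => simp [pvBrec, pvSpec]
  | cons b t ih =>
    cases j with
    | zero =>
      simp only [pvBrec, pvSpec, List.getElem?_cons_zero, Option.map_some, brec_snd]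
      have : (b :: t)[1]? = t[0]? := by simp
      rw [this]
      split_ifs <;> rfl
    | succ j =>
      simp only [pvBrec, pvSpec, List.getElem?_cons_succ]
      rw [ih j]
      rfl

theorem a_getElem? (working : Bool) (bids : List (Int × Int × Bool)) (j : Nat) :
    (create_bid working bids)[j]? = pvSpec working bids j := by
  rw [create_bid_eq_map, List.getElem?_map, PySem.List.getElem?_enumerate]
  unfold pvSpec
  cases hb : bids[j]? with
  | none => simp
  | some b =>
    have hj : j < bids.length := by
      by_contra h
      rw [List.getElem?_eq_none (le_of_not_gt h)] at hb
      simp at hb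
    simp only [Option.map_some, Option.some.injEq]
    unfold pvFlagA
    simp only []
    have hidx : ((0 : Int) + (j : Int) + 1) = ((j + 1 : Nat) : Int) := by push_cast; ring
    by_cases hlast : j + 1 < bids.length
    · have h1 : bids[j+1]? = some bids[j+1] := List.getElem?_eq_getElem hlast
      have hlt : ((0 : Int) + (j : Int) < (bids.length : Int) - 1) := by omega
      rw [h1]
      have hg : PySem.List.pyGetD bids ((0 : Int) + (j : Int) + 1) (0, 0, false) = bids[j+1] := by
        rw [hidx, PySem.List.pyGetD_natCast, List.getD_eq_getElem bids _ hlast]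
      rw [hg]
      simp only [Option.map_some, Option.getD_some, hlt, decide_true, Bool.and_true]
      split_ifs <;> rfl
    · have h1 : bids[j+1]? = none := List.getElem?_eq_none (le_of_not_gt hlast)
      have hlt : ¬ ((0 : Int) + (j : Int) < (bids.length : Int) - 1) := by omega
      rw [h1]
      simp only [Option.map_none, Option.getD_none, hlt, decide_false, Bool.and_false,
        Bool.false_and, Bool.and_false, Bool.false_eq_true, if_false]
      split_ifs <;> rfl

-- ===== VERDICT (by name: the statement is the Claim_ definition above) =====
theorem create_bid_spec : Claim_equal_create_bid := by
  intro working bids _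
  unfold Spec_create_bid
  rw [create_bid_alt_eq_brec]
  apply List.ext_getElem?
  intro j
  rw [a_getElem?, brec_getElem?]
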